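-- pv_equiv track=rewrite | github.com/Finnem/XBPy | module/xbpy/orcautil/led_fragment.py | _order_covalent_bonds
-- ===== SOURCE A (Python) =====
-- def _order_covalent_bonds(covalent_bonds, fragments, center_fragment_last):
--     if not covalent_bonds:
--         return []
--     if not center_fragment_last or not fragments:
--         return sorted(covalent_bonds)
--     center_set = set(fragments[-1])
--     first = []
--     rest = []
--     for a, b in covalent_bonds:
--         if (a in center_set) ^ (b in center_set):
--             first.append((a, b))
--         else:
--             rest.append((a, b))
--     return sorted(first) + sorted(rest)
-- ===== SOURCE B (Python) =====
-- def _order_covalent_bonds(covalent_bonds, fragments, center_fragment_last):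
--     center = set(fragments[-1]) if center_fragment_last and fragments else set()
--     return sorted(covalent_bonds,
--                   key=lambda b: ((b[0] in center) == (b[1] in center), b[0], b[1]))
-- ===== Notes on version B (the rewrite author's own statement) =====
-- stated objective: simpler
-- what changed: Replaced A's guard chain, explicit partition loop, two separate sorts and a concatenation with a single branch-free sort of the whole list under the composite key (both-or-neither-endpoint-in-center, a, b); the empty-list and no-center cases fall out of the same sort instead of being special-cased.
import Mathlib
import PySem

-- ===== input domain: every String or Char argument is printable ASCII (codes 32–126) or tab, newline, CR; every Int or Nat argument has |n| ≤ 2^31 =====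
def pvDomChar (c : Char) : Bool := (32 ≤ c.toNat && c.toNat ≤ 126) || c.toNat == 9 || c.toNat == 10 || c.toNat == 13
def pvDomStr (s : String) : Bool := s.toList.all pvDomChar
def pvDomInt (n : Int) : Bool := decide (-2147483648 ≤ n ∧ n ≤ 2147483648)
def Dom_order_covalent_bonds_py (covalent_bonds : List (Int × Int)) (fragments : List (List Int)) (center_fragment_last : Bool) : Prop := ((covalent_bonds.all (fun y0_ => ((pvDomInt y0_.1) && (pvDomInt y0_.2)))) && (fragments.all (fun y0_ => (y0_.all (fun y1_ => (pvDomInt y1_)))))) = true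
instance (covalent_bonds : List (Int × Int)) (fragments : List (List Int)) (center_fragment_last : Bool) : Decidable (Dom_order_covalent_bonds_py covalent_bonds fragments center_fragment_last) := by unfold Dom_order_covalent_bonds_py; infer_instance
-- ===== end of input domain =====

-- B replaces A's guard chain + partition loop + two sorts + concatenation with a single branch-free
-- sort under the composite key (both-or-neither-endpoint-in-center, a, b) (objective: simpler).

-- ===== PORT A =====
def order_covalent_bonds_py (covalent_bonds : List (Int × Int)) (fragments : List (List Int)) (center_fragment_last : Bool) : List (Int × Int) :=
  if covalent_bonds = [] then []
  else if center_fragment_last = false ∨ fragments = [] then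
    PySem.List.sorted2 covalent_bonds (fun b => b.1) (fun b => b.2)
  else
    -- fragments[-1]: fragments ≠ [] in this branch, so pyGet? is some and the getD default is unreachable
    let center_set : PySem.Set Int := PySem.Set.ofList ((PySem.List.pyGet? fragments (-1)).getD [])
    let fr := covalent_bonds.foldl
      (fun (acc : List (Int × Int) × List (Int × Int)) bond =>
        if Bool.xor (PySem.Set.contains center_set bond.1) (PySem.Set.contains center_set bond.2) then
          (acc.1 ++ [bond], acc.2)
        else
          (acc.1, acc.2 ++ [bond])) ([], [])
    PySem.List.sorted2 fr.1 (fun b => b.1) (fun b => b.2)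
      ++ PySem.List.sorted2 fr.2 (fun b => b.1) (fun b => b.2)

-- ===== PORT B =====
-- Python's 3-tuple key (bool, a, b) compares lexicographically (False < True); ported by hand as
-- the strict lexicographic comparator on (key, a, b) — exact for Python's tuple '<'.
def pvKeyLt (g : (Int × Int) → Bool) (x y : Int × Int) : Bool :=
  (!g x && g y) || (g x == g y && (x.1 < y.1 || (x.1 == y.1 && x.2 < y.2)))

-- sorted(covalent_bonds, key=…) ported as PySem's stable insertion sort (sorted_eq_foldl_insertBy:
-- this foldl IS PySem.List.sorted with that key; nested Lex key types do not evaluate)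
def order_covalent_bonds_py_alt (covalent_bonds : List (Int × Int)) (fragments : List (List Int)) (center_fragment_last : Bool) : List (Int × Int) :=
  let center : PySem.Set Int :=
    if center_fragment_last = true ∧ fragments ≠ [] then
      PySem.Set.ofList ((PySem.List.pyGet? fragments (-1)).getD [])
    else PySem.Set.ofList []
  let g : (Int × Int) → Bool :=
    fun b => PySem.Set.contains center b.1 == PySem.Set.contains center b.2
  covalent_bonds.foldl (fun acc x => PySem.List.insertBy (pvKeyLt g) x acc) []

-- ===== PRECONDITION & SPEC =====
def Spec_order_covalent_bonds_py (covalent_bonds : List (Int × Int)) (fragments : List (List Int)) (center_fragment_last : Bool) (out : List (Int × Int)) : Prop := out = order_covalent_bonds_py_alt covalent_bonds fragments center_fragment_last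
instance (covalent_bonds : List (Int × Int)) (fragments : List (List Int)) (center_fragment_last : Bool) (out : List (Int × Int)) : Decidable (Spec_order_covalent_bonds_py covalent_bonds fragments center_fragment_last out) := by unfold Spec_order_covalent_bonds_py; infer_instance

-- ===== CLAIM (what is proved, stated in full; the proofs are below) =====
def Claim_equal_order_covalent_bonds_py : Prop := ∀ (covalent_bonds : List (Int × Int)) (fragments : List (List Int)) (center_fragment_last : Bool), Dom_order_covalent_bonds_py covalent_bonds fragments center_fragment_last → Spec_order_covalent_bonds_py covalent_bonds fragments center_fragment_last (order_covalent_bonds_py covalent_bonds fragments center_fragment_last)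

-- ===== LEMMAS AND PROOFS =====

-- insertBy only inspects `before`, so extensionally equal comparators give the same result
theorem pv_insertBy_congr {α : Type} (f g : α → α → Bool) (h : ∀ a b, f a b = g a b)
    (x : α) (ys : List α) : PySem.List.insertBy f x ys = PySem.List.insertBy g x ys := by
  induction ys with
  | nil => rfl
  | cons y ys ih =>
    show (if f x y then _ else y :: PySem.List.insertBy f x ys)
       = (if g x y then _ else y :: PySem.List.insertBy g x ys)
    rw [h x y, ih]

-- sorted2 (Python tuple sort) is sorted with the lexicographic key
theorem pv_sorted2_eq_sorted_toLex (xs : List (Int × Int)) :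
    PySem.List.sorted2 xs (fun b => b.1) (fun b => b.2)
      = PySem.List.sorted xs (fun b => toLex b) := by
  show List.foldl _ [] xs = List.foldl _ [] xs
  refine PySem.List.foldl_congr_mem _ _ _ _ (fun acc x _ => ?_)
  refine pv_insertBy_congr _ _ (fun a b => ?_) _ _
  have : (toLex a < toLex b) ↔ (a.1 < b.1 ∨ a.1 = b.1 ∧ a.2 < b.2) := Prod.Lex.toLex_lt_toLex
  by_cases h1 : a.1 < b.1 <;> by_cases h2 : b.1 < a.1 <;> by_cases h3 : a.2 < b.2 <;>
    simp [h1, h2, h3, this] <;> omega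

-- B's hand-written comparator is exactly the strict order of the composite Lex key, so B's
-- insertion-sort fold IS PySem.List.sorted with that key
theorem pv_altfold_eq_sorted (g : (Int × Int) → Bool) (cb : List (Int × Int)) :
    cb.foldl (fun acc x => PySem.List.insertBy (pvKeyLt g) x acc) []
      = PySem.List.sorted cb (fun b => toLex ((g b : Bool), toLex (b.1, b.2))) := by
  rw [PySem.List.sorted_eq_foldl_insertBy]
  refine PySem.List.foldl_congr_mem _ _ _ _ (fun acc x _ => ?_)
  refine pv_insertBy_congr _ _ (fun a b => ?_) _ _
  cases hga : g a <;> cases hgb : g b <;>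
    by_cases h1 : a.1 < b.1 <;> by_cases h2 : a.1 = b.1 <;> by_cases h3 : a.2 < b.2 <;>
      simp [pvKeyLt, hga, hgb, h1, h2, h3, Prod.Lex.toLex_lt_toLex, Bool.lt_iff] <;> omega

-- A's partition loop is the pair of filters
theorem pv_partition_fold {α : Type} (c : α → Bool) (l : List α) :
    l.foldl (fun (acc : List α × List α) x =>
        if c x then (acc.1 ++ [x], acc.2) else (acc.1, acc.2 ++ [x])) ([], [])
      = (l.filter c, l.filter (fun x => !c x)) := by
  have h1 : l.foldl (fun (acc : List α × List α) x =>
        if c x then (acc.1 ++ [x], acc.2) else (acc.1, acc.2 ++ [x])) ([], [])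
      = l.foldl (fun (acc : List α × List α) x =>
        (if c x then acc.1 ++ [x] else acc.1,
         if !c x then acc.2 ++ [x] else acc.2)) ([], []) := by
    refine PySem.List.foldl_congr_mem _ _ _ _ (fun acc x _ => ?_)
    cases h : c x <;> simp only [Bool.not_false, Bool.not_true, if_true] <;> rfl
  rw [h1, PySem.List.foldl_prod_mk (f := fun a x => if c x then a ++ [x] else a)
      (g := fun a x => if !c x then a ++ [x] else a),
    PySem.List.foldl_append_if_eq_filter, PySem.List.foldl_append_if_eq_filter]
  simp

-- CORE: the two-pass "sorted(xor-bonds) ++ sorted(rest)" is one sort by the composite key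
-- (¬ xor, a, b): both sides are permutations of cb and nondecreasing under that injective key.
theorem pv_two_pass (g : (Int × Int) → Bool) (cb : List (Int × Int)) :
    PySem.List.sorted (cb.filter (fun x => !g x)) (fun b => toLex b)
      ++ PySem.List.sorted (cb.filter g) (fun b => toLex b)
      = PySem.List.sorted cb (fun b => toLex (g b, toLex (b.1, b.2))) := by
  have hle : ∀ a b : Int × Int,
      (toLex ((g a : Bool), toLex a) ≤ toLex ((g b : Bool), toLex b))
        ↔ (g a < g b ∨ g a = g b ∧ toLex a ≤ toLex b) := fun a b =>
    Prod.Lex.toLex_le_toLex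
  refine PySem.List.eq_of_perm_of_pairwise_le_of_injective
    (fun b : Int × Int => toLex ((g b : Bool), toLex b)) ?_ ?_ ?_ ?_
  · intro a b h
    exact congrArg (fun x : Lex (Bool × Lex (Int × Int)) => ofLex (ofLex x).2) h
  · refine ((PySem.List.sorted_perm _ _ false).append (PySem.List.sorted_perm _ _ false)).trans
      (List.Perm.trans ?_ (PySem.List.sorted_perm cb _ false).symm)
    simpa using (List.filter_append_perm (fun x => !g x) cb)
  · rw [List.pairwise_append]
    refine ⟨?_, ?_, ?_⟩
    · refine (PySem.List.sorted_pairwise (cb.filter (fun x => !g x))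
        (fun b : Int × Int => toLex b)).imp_of_mem (fun {a b} ha hb hab => ?_)
      have hga : g a = false := by
        simpa using List.of_mem_filter ((PySem.List.mem_sorted _ _ _ _).mp ha)
      have hgb : g b = false := by
        simpa using List.of_mem_filter ((PySem.List.mem_sorted _ _ _ _).mp hb)
      exact (hle a b).mpr (Or.inr ⟨by rw [hga, hgb], hab⟩)
    · refine (PySem.List.sorted_pairwise (cb.filter g)
        (fun b : Int × Int => toLex b)).imp_of_mem (fun {a b} ha hb hab => ?_)
      have hga : g a = true := List.of_mem_filter ((PySem.List.mem_sorted _ _ _ _).mp ha)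
      have hgb : g b = true := List.of_mem_filter ((PySem.List.mem_sorted _ _ _ _).mp hb)
      exact (hle a b).mpr (Or.inr ⟨by rw [hga, hgb], hab⟩)
    · intro a ha b hb
      have hga : g a = false := by
        simpa using List.of_mem_filter ((PySem.List.mem_sorted _ _ _ _).mp ha)
      have hgb : g b = true := List.of_mem_filter ((PySem.List.mem_sorted _ _ _ _).mp hb)
      exact (hle a b).mpr (Or.inl (by rw [hga, hgb]; exact Bool.false_lt_true))
  · exact PySem.List.sorted_pairwise cb _

-- ===== VERDICT (by name: the statement is the Claim_ definition above) =====
theorem order_covalent_bonds_py_spec : Claim_equal_order_covalent_bonds_py := by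
  intro covalent_bonds fragments center_fragment_last _
  unfold Spec_order_covalent_bonds_py order_covalent_bonds_py order_covalent_bonds_py_alt
  simp only [pv_altfold_eq_sorted]
  by_cases h1 : center_fragment_last = false ∨ fragments = []
  · have hc : ¬ (center_fragment_last = true ∧ fragments ≠ []) := by
      rcases h1 with h | h
      · rintro ⟨h', _⟩; rw [h'] at h; cases h
      · rintro ⟨_, h'⟩; exact h' h
    simp only [if_neg hc]
    by_cases h0 : covalent_bonds = []
    · simp [h0, PySem.List.sorted]
    simp only [h0, if_false, if_pos h1]
    have h2 := pv_two_pass (fun _ : Int × Int => true) covalent_bonds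
    simp only [Bool.not_true, List.filter_false, List.filter_true] at h2
    have hnil : PySem.List.sorted ([] : List (Int × Int)) (fun b => toLex b) = [] := rfl
    rw [hnil, List.nil_append] at h2
    have hkey : (fun b : Int × Int =>
        toLex ((PySem.Set.contains (PySem.Set.ofList ([] : List Int)) b.1 ==
                PySem.Set.contains (PySem.Set.ofList ([] : List Int)) b.2),
               toLex (b.1, b.2)))
        = fun b : Int × Int => toLex ((true : Bool), toLex (b.1, b.2)) := by
      funext b; rfl
    rw [pv_sorted2_eq_sorted_toLex, hkey]
    exact h2
  · have hc : center_fragment_last = true ∧ fragments ≠ [] := by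
      push Not at h1
      exact ⟨by simpa using h1.1, h1.2⟩
    by_cases h0 : covalent_bonds = []
    · simp [h0, hc, PySem.List.sorted]
    simp only [h0, if_false, if_neg h1, if_pos hc]
    set cs : PySem.Set Int := PySem.Set.ofList ((PySem.List.pyGet? fragments (-1)).getD [])
    set p : (Int × Int) → Bool :=
      fun bond => Bool.xor (PySem.Set.contains cs bond.1) (PySem.Set.contains cs bond.2) with hp
    set gk : (Int × Int) → Bool :=
      fun bond => PySem.Set.contains cs bond.1 == PySem.Set.contains cs bond.2 with hgk
    have hpg : ∀ x, p x = !gk x := by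
      intro x
      rw [hp, hgk]
      cases PySem.Set.contains cs x.1 <;> cases PySem.Set.contains cs x.2 <;> rfl
    rw [pv_partition_fold p covalent_bonds]
    have hf1 : covalent_bonds.filter p = covalent_bonds.filter (fun x => !gk x) :=
      List.filter_congr (fun x _ => hpg x)
    have hf2 : covalent_bonds.filter (fun x => !p x) = covalent_bonds.filter gk :=
      List.filter_congr (fun x _ => by rw [hpg x, Bool.not_not])
    simp only [hf1, hf2]
    rw [pv_sorted2_eq_sorted_toLex, pv_sorted2_eq_sorted_toLex]
    exact pv_two_pass gk covalent_bonds
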